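-- pv_equiv track=rewrite | github.com/joshuathomascarter/MNIST-Accel | sw/python/simulate_array.py | create_skewed_stream_python
-- ===== SOURCE A (Python) =====
-- def create_skewed_stream_python(matrix):
--     """
--     Convert a matrix to skewed input stream (Python version).
--     This mimics the C++ pack_skewed_input function.
--     """
--     rows = len(matrix)
--     cols = len(matrix[0]) if rows > 0 else 0
--     total_cycles = rows + cols
--
--     # Create the stream: rows bytes per cycle
--     stream = [[0] * rows for _ in range(total_cycles)]
--
--     for r in range(rows):
--         for c in range(cols):
--             cycle_time = c + r
--             stream[cycle_time][r] = matrix[r][c]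
--
--     return stream
-- ===== SOURCE B (Python) =====
-- def create_skewed_stream_python(matrix):
--     rows = len(matrix)
--     cols = len(matrix[0]) if rows > 0 else 0
--     return [[matrix[r][t - r] if 0 <= t - r < cols else 0 for r in range(rows)]
--             for t in range(rows + cols)]
-- ===== Notes on version B (the rewrite author's own statement) =====
-- stated objective: simpler
-- what changed: Scatter inverted to gather: instead of zero-initializing a stream and scattering matrix[r][c] into stream[c+r][r], B builds each output row t directly as [matrix[r][t-r] if in range else 0], so the zero padding comes from the bounds guard and the zero-fill pass disappears.
import Mathlib
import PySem

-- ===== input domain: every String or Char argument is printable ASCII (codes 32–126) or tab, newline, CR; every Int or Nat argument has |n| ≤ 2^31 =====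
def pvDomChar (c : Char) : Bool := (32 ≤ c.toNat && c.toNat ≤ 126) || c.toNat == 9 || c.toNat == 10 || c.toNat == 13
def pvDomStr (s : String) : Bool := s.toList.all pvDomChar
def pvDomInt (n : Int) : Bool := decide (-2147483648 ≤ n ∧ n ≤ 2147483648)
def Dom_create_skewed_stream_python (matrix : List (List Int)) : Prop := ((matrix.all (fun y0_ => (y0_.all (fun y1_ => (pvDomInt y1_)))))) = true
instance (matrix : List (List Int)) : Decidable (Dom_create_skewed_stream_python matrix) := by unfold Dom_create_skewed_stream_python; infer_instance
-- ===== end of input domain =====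

-- B inverts A's scatter into a per-cycle gather (one comprehension, zero padding from a bounds
-- guard instead of a zero-fill pass); same output, similar cost ("simpler" objective).

-- ===== PORT A =====
-- Literal port of A: zero-initialize `stream`, then scatter matrix[r][c] into stream[c+r][r].
def create_skewed_stream_python (matrix : List (List Int)) : List (List Int) :=
  let rows := matrix.length
  let cols := if rows > 0 then (matrix.headD []).length else 0
  let total_cycles := rows + cols
  let stream := (List.range total_cycles).map (fun _ => List.replicate rows (0 : Int))
  (List.range rows).foldl (fun st r =>
    (List.range cols).foldl (fun st c =>
      st.set (c + r) (((st.getD (c + r) []).set r ((matrix.getD r []).getD c 0)))) st) stream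

-- ===== PORT B =====
-- Literal port of B: build row t directly as a gather with a bounds guard.
def create_skewed_stream_python_alt (matrix : List (List Int)) : List (List Int) :=
  let rows := matrix.length
  let cols := if rows > 0 then (matrix.headD []).length else 0
  (List.range (rows + cols)).map (fun t =>
    (List.range rows).map (fun r =>
      if r ≤ t ∧ t - r < cols then (matrix.getD r []).getD (t - r) 0 else 0))

-- ===== PRECONDITION & SPEC =====
-- Pre_ excludes exactly the ragged matrices with some row shorter than the first row:
-- there Python A raises IndexError reading matrix[r][c] (and Python B raises too).
def Pre_create_skewed_stream_python (matrix : List (List Int)) : Prop :=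
  ∀ row ∈ matrix, (matrix.headD []).length ≤ row.length
instance (matrix : List (List Int)) : Decidable (Pre_create_skewed_stream_python matrix) := by
  unfold Pre_create_skewed_stream_python; infer_instance

def pvWitness_create_skewed_stream_python : List (List Int) := [[1, 2], [3, 4]]

def Spec_create_skewed_stream_python (matrix : List (List Int)) (out : List (List Int)) : Prop := out = create_skewed_stream_python_alt matrix
instance (matrix : List (List Int)) (out : List (List Int)) : Decidable (Spec_create_skewed_stream_python matrix out) := by unfold Spec_create_skewed_stream_python; infer_instance

-- ===== CLAIM (what is proved, stated in full; the proofs are below) =====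
def Claim_equal_create_skewed_stream_python : Prop := ∀ (matrix : List (List Int)), Dom_create_skewed_stream_python matrix → Pre_create_skewed_stream_python matrix → Spec_create_skewed_stream_python matrix (create_skewed_stream_python matrix)

-- ===== LEMMAS AND PROOFS =====

-- the grid of partially-filled stream states, parametrized by which cells are filled
def pvGrid (m : List (List Int)) (total rows : Nat) (cond : Nat → Nat → Bool) : List (List Int) :=
  (List.range total).map (fun t =>
    (List.range rows).map (fun r => if cond t r then (m.getD r []).getD (t - r) 0 else 0))

-- fill condition after processing r full rows and k columns of row r
def pvCnd (r k cols : Nat) (t r' : Nat) : Bool :=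
  (decide (r' < r) && decide (r' ≤ t) && decide (t - r' < cols)) ||
  (decide (r' = r) && decide (r ≤ t) && decide (t - r < k))

theorem pvCnd_iff (r k cols t r' : Nat) :
    pvCnd r k cols t r' = true ↔
      ((r' < r ∧ r' ≤ t ∧ t - r' < cols) ∨ (r' = r ∧ r ≤ t ∧ t - r < k)) := by
  simp [pvCnd, and_assoc]

theorem bool_eq_of_iff {b1 b2 : Bool} (h : b1 = true ↔ b2 = true) : b1 = b2 := by
  cases b1 <;> cases b2 <;> simp_all

theorem pvGrid_congr (m : List (List Int)) (total rows : Nat) (c₁ c₂ : Nat → Nat → Bool)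
    (h : ∀ t < total, ∀ r < rows, (c₁ t r = true ↔ c₂ t r = true)) :
    pvGrid m total rows c₁ = pvGrid m total rows c₂ := by
  unfold pvGrid
  refine List.map_congr_left (fun t ht => ?_)
  refine List.map_congr_left (fun r hr => ?_)
  rw [bool_eq_of_iff (h t (List.mem_range.mp ht) r (List.mem_range.mp hr))]

theorem map_range_set {α : Type} (n i : Nat) (f : Nat → α) (x : α) :
    ((List.range n).map f).set i x
      = (List.range n).map (fun j => if j = i then x else f j) := by
  apply List.ext_getElem
  · simp
  · intro j h1 h2
    simp only [List.getElem_set, List.getElem_map, List.getElem_range]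
    by_cases h : j = i
    · subst h
      simp
    · rw [if_neg (fun he => h he.symm), if_neg h]

theorem map_range_getD {α : Type} (n i : Nat) (f : Nat → α) (d : α) (h : i < n) :
    ((List.range n).map f).getD i d = f i := by
  rw [List.getD_eq_getElem?_getD]
  simp [h]

-- one scatter step fills cell (c+r, r)
theorem pvStep (m : List (List Int)) (rows cols r c : Nat)
    (hr : r < rows) (hc : c < cols) :
    (pvGrid m (rows + cols) rows (pvCnd r c cols)).set (c + r)
      (((pvGrid m (rows + cols) rows (pvCnd r c cols)).getD (c + r) []).set r
        ((m.getD r []).getD c 0))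
      = pvGrid m (rows + cols) rows (pvCnd r (c + 1) cols) := by
  have htot : c + r < rows + cols := by omega
  unfold pvGrid
  rw [map_range_getD _ _ _ _ htot, map_range_set, map_range_set]
  refine List.map_congr_left (fun t ht => ?_)
  have ht' := List.mem_range.mp ht
  by_cases h1 : t = c + r
  · subst h1
    rw [if_pos rfl]
    refine List.map_congr_left (fun r' hr' => ?_)
    have hr'' := List.mem_range.mp hr'
    by_cases h2 : r' = r
    · rw [if_pos h2]
      subst h2
      rw [if_pos (show pvCnd r' (c + 1) cols (c + r') r' = true by
        rw [pvCnd_iff]; omega)]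
      rw [Nat.add_sub_cancel]
    · rw [if_neg h2,
        show pvCnd r c cols (c + r) r' = pvCnd r (c + 1) cols (c + r) r' from
          bool_eq_of_iff (by rw [pvCnd_iff, pvCnd_iff]; omega)]
  · rw [if_neg h1]
    refine List.map_congr_left (fun r' hr' => ?_)
    rw [show pvCnd r c cols t r' = pvCnd r (c + 1) cols t r' from
      bool_eq_of_iff (by rw [pvCnd_iff, pvCnd_iff]; omega)]

-- inner loop: folding columns 0..k-1 of row r
theorem pvInner (m : List (List Int)) (rows cols r : Nat) (hr : r < rows) :
    ∀ k ≤ cols,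
      (List.range k).foldl (fun st c =>
        st.set (c + r) (((st.getD (c + r) []).set r ((m.getD r []).getD c 0))))
        (pvGrid m (rows + cols) rows (pvCnd r 0 cols))
      = pvGrid m (rows + cols) rows (pvCnd r k cols) := by
  intro k hk
  induction k with
  | zero => simp
  | succ n ih =>
    rw [List.range_succ, List.foldl_append, ih (by omega), List.foldl_cons, List.foldl_nil]
    exact pvStep m rows cols r n hr (by omega)

-- outer loop: folding rows 0..k-1
theorem pvOuter (m : List (List Int)) (rows cols : Nat) :
    ∀ k ≤ rows,
      (List.range k).foldl (fun st r =>
        (List.range cols).foldl (fun st c =>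
          st.set (c + r) (((st.getD (c + r) []).set r ((m.getD r []).getD c 0)))) st)
        (pvGrid m (rows + cols) rows (fun _ _ => false))
      = pvGrid m (rows + cols) rows (pvCnd k 0 cols) := by
  intro k hk
  induction k with
  | zero =>
    rw [List.range_zero, List.foldl_nil]
    exact pvGrid_congr _ _ _ _ _ (by
      intro t _ r _
      rw [pvCnd_iff]
      simp only [Bool.false_eq_true, false_iff]
      omega)
  | succ n ih =>
    rw [List.range_succ, List.foldl_append, ih (by omega), List.foldl_cons, List.foldl_nil]
    rw [pvInner m rows cols n (by omega) cols (le_refl _)]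
    exact pvGrid_congr _ _ _ _ _ (by
      intro t _ r _
      rw [pvCnd_iff, pvCnd_iff]
      omega)

-- the zero-initialized stream is the grid with nothing filled
theorem pvZero (m : List (List Int)) (total rows : Nat) :
    (List.range total).map (fun _ => List.replicate rows (0 : Int))
      = pvGrid m total rows (fun _ _ => false) := by
  unfold pvGrid
  refine List.map_congr_left (fun t _ => ?_)
  simp

-- ===== VERDICT (by name: the statement is the Claim_ definition above) =====
theorem create_skewed_stream_python_spec : Claim_equal_create_skewed_stream_python := by
  intro matrix _ _
  unfold Spec_create_skewed_stream_python
  simp only [create_skewed_stream_python, create_skewed_stream_python_alt]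
  generalize (if matrix.length > 0 then (matrix.headD []).length else 0) = cols
  rw [pvZero matrix (matrix.length + cols) matrix.length,
    pvOuter matrix matrix.length cols matrix.length (le_refl _)]
  unfold pvGrid
  refine List.map_congr_left (fun t ht => ?_)
  refine List.map_congr_left (fun r hr => ?_)
  have hr' := List.mem_range.mp hr
  by_cases h : r ≤ t ∧ t - r < cols
  · rw [if_pos (show pvCnd matrix.length 0 cols t r = true by rw [pvCnd_iff]; omega),
      if_pos h]
  · rw [if_neg (show ¬ pvCnd matrix.length 0 cols t r = true by rw [pvCnd_iff]; omega),
      if_neg h]
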